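-- pv_equiv track=rewrite | github.com/jiriherza/PG | fourth.py | je_tah_mozny_vez
-- ===== SOURCE A (Python) =====
-- def je_tah_mozny_vez(pozice, cilova_pozice, obsazene_pozice):
--     radek, sloupec = pozice
--     cil_radek, cil_sloupec = cilova_pozice
--
--     if radek != cil_radek and sloupec != cil_sloupec:
--         return False
--
--     if radek == cil_radek:
--         start = min(sloupec, cil_sloupec)
--         end = max(sloupec, cil_sloupec)
--         for i in range(start + 1, end):
--             if (radek, i) in obsazene_pozice:
--                 return False
--         return True
--     elif sloupec == cil_sloupec:
--         start = min(radek, cil_radek)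
--         end = max(radek, cil_radek)
--         for ii in range(start + 1, end):
--             if (ii, sloupec) in obsazene_pozice:
--                 return False
--         return True
--     else:
--         return False
-- ===== SOURCE B (Python) =====
-- def je_tah_mozny_vez(pozice, cilova_pozice, obsazene_pozice):
--     radek, sloupec = pozice
--     cil_radek, cil_sloupec = cilova_pozice
--     if radek != cil_radek and sloupec != cil_sloupec:
--         return False
--     for (r, c) in obsazene_pozice:
--         if radek == cil_radek:
--             if r == radek and min(sloupec, cil_sloupec) < c < max(sloupec, cil_sloupec):
--                 return False
--         else:
--             if c == sloupec and min(radek, cil_radek) < r < max(radek, cil_radek):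
--                 return False
--     return True
-- ===== Notes on version B (the rewrite author's own statement) =====
-- stated objective: alternative
-- what changed: B iterates once over the occupied positions and tests each for strict betweenness on the move's line, instead of iterating over every square between source and target and testing membership in the occupied list.
import Mathlib
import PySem

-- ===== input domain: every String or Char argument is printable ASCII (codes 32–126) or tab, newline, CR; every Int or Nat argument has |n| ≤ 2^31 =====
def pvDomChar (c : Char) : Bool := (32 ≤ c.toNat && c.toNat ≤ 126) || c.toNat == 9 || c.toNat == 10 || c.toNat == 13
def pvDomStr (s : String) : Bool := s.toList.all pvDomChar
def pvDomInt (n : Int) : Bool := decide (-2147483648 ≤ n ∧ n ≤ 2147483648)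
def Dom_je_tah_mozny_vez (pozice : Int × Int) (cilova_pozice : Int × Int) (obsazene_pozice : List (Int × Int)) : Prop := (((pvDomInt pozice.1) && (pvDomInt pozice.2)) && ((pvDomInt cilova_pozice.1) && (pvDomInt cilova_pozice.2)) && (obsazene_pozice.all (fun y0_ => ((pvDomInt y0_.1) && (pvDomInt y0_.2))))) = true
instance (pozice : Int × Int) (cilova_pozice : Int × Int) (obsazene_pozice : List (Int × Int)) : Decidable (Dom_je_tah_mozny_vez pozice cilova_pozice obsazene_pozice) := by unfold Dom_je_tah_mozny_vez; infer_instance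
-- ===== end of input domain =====

-- B replaces A's scan of every square between source and target (membership test per square)
-- by a single pass over the occupied positions with a strict betweenness test (alternative decomposition).

-- ===== PORT A =====
def je_tah_mozny_vez (pozice : Int × Int) (cilova_pozice : Int × Int) (obsazene_pozice : List (Int × Int)) : Bool :=
  let radek := pozice.1
  let sloupec := pozice.2
  let cil_radek := cilova_pozice.1
  let cil_sloupec := cilova_pozice.2
  if radek ≠ cil_radek ∧ sloupec ≠ cil_sloupec then false
  else if radek = cil_radek then
    -- for i in range(start+1, end): early return False on occupied square
    !((PySem.List.pyRange (min sloupec cil_sloupec + 1) (max sloupec cil_sloupec) 1).any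
        (fun i => obsazene_pozice.contains (radek, i)))
  else if sloupec = cil_sloupec then
    !((PySem.List.pyRange (min radek cil_radek + 1) (max radek cil_radek) 1).any
        (fun ii => obsazene_pozice.contains (ii, sloupec)))
  else false

-- ===== PORT B =====
def je_tah_mozny_vez_alt (pozice : Int × Int) (cilova_pozice : Int × Int) (obsazene_pozice : List (Int × Int)) : Bool :=
  let radek := pozice.1
  let sloupec := pozice.2
  let cil_radek := cilova_pozice.1
  let cil_sloupec := cilova_pozice.2
  if radek ≠ cil_radek ∧ sloupec ≠ cil_sloupec then false
  else
    -- one pass over the occupied positions: early return False on a blocker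
    !(obsazene_pozice.any (fun rc =>
        if radek = cil_radek then
          rc.1 == radek && decide (min sloupec cil_sloupec < rc.2) && decide (rc.2 < max sloupec cil_sloupec)
        else
          rc.2 == sloupec && decide (min radek cil_radek < rc.1) && decide (rc.1 < max radek cil_radek)))

-- ===== PRECONDITION & SPEC =====
def Spec_je_tah_mozny_vez (pozice : Int × Int) (cilova_pozice : Int × Int) (obsazene_pozice : List (Int × Int)) (out : Bool) : Prop := out = je_tah_mozny_vez_alt pozice cilova_pozice obsazene_pozice
instance (pozice : Int × Int) (cilova_pozice : Int × Int) (obsazene_pozice : List (Int × Int)) (out : Bool) : Decidable (Spec_je_tah_mozny_vez pozice cilova_pozice obsazene_pozice out) := by unfold Spec_je_tah_mozny_vez; infer_instance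

-- ===== CLAIM (what is proved, stated in full; the proofs are below) =====
def Claim_equal_je_tah_mozny_vez : Prop := ∀ (pozice : Int × Int) (cilova_pozice : Int × Int) (obsazene_pozice : List (Int × Int)), Dom_je_tah_mozny_vez pozice cilova_pozice obsazene_pozice → Spec_je_tah_mozny_vez pozice cilova_pozice obsazene_pozice (je_tah_mozny_vez pozice cilova_pozice obsazene_pozice)

-- ===== LEMMAS AND PROOFS =====

-- Scanning the squares strictly between s and cs on row r equals scanning the pieces for a blocker on that row.
theorem row_scan_eq (r s cs : Int) (occ : List (Int × Int)) :
    ((PySem.List.pyRange (min s cs + 1) (max s cs) 1).any (fun i => occ.contains (r, i)))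
    = occ.any (fun rc => rc.1 == r && decide (min s cs < rc.2) && decide (rc.2 < max s cs)) := by
  rw [Bool.eq_iff_iff]
  simp only [List.any_eq_true, PySem.List.mem_pyRange_one, List.contains_iff_mem,
    Bool.and_eq_true, beq_iff_eq, decide_eq_true_eq]
  constructor
  · rintro ⟨i, ⟨h1, h2⟩, hmem⟩
    exact ⟨(r, i), hmem, ⟨by simp, by omega⟩, by omega⟩
  · rintro ⟨⟨a, b⟩, hmem, ⟨ha, hb1⟩, hb2⟩
    simp only at ha hb1 hb2
    exact ⟨b, ⟨by omega, by omega⟩, ha ▸ hmem⟩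

-- Same for a column move.
theorem col_scan_eq (c s cs : Int) (occ : List (Int × Int)) :
    ((PySem.List.pyRange (min s cs + 1) (max s cs) 1).any (fun ii => occ.contains (ii, c)))
    = occ.any (fun rc => rc.2 == c && decide (min s cs < rc.1) && decide (rc.1 < max s cs)) := by
  rw [Bool.eq_iff_iff]
  simp only [List.any_eq_true, PySem.List.mem_pyRange_one, List.contains_iff_mem,
    Bool.and_eq_true, beq_iff_eq, decide_eq_true_eq]
  constructor
  · rintro ⟨i, ⟨h1, h2⟩, hmem⟩
    exact ⟨(i, c), hmem, ⟨by simp, by omega⟩, by omega⟩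
  · rintro ⟨⟨a, b⟩, hmem, ⟨hb, ha1⟩, ha2⟩
    simp only at hb ha1 ha2
    exact ⟨a, ⟨by omega, by omega⟩, hb ▸ hmem⟩

-- ===== VERDICT (by name: the statement is the Claim_ definition above) =====
theorem je_tah_mozny_vez_spec : Claim_equal_je_tah_mozny_vez := by
  intro ⟨r, s⟩ ⟨cr, cs⟩ occ _
  unfold Spec_je_tah_mozny_vez je_tah_mozny_vez je_tah_mozny_vez_alt
  simp only
  by_cases hguard : r ≠ cr ∧ s ≠ cs
  · simp [hguard]
  · rw [if_neg hguard, if_neg hguard]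
    by_cases hr : r = cr
    · rw [if_pos hr, row_scan_eq]
      simp only [if_pos hr]
    · have hs : s = cs := by tauto
      rw [if_neg hr, if_pos hs, col_scan_eq]
      simp only [if_neg hr]
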